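-- pv_equiv track=rewrite | github.com/guimath/MEProject | Music_editor/MEPUtilitaries.py | remove_feat
-- ===== SOURCE A (Python) =====
-- def remove_feat(title):
--     if "(Ft" in title or "(ft" in title or "(Feat" in title or "(feat" in title:
--         # complicated in case there is anothere paranthesis in the title
--         b = []
--         b = title.split("(")
--         title = b[0]
--         for i in range(1, len(b)-1):
--             title = title + "(" + b[i]
--     return title.strip()
-- ===== SOURCE B (Python) =====
-- def remove_feat(title):
--     if "(Ft" in title or "(ft" in title or "(Feat" in title or "(feat" in title:
--         # the guard guarantees an opening parenthesis exists, so rfind cannot miss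
--         title = title[:title.rfind("(")]
--     return title.strip()
-- ===== Notes on version B (the rewrite author's own statement) =====
-- stated objective: simpler
-- what changed: Instead of splitting the title at every opening parenthesis and rebuilding the prefix part-by-part in a loop, B locates the last opening parenthesis with rfind and slices the title before it.
import Mathlib
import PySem

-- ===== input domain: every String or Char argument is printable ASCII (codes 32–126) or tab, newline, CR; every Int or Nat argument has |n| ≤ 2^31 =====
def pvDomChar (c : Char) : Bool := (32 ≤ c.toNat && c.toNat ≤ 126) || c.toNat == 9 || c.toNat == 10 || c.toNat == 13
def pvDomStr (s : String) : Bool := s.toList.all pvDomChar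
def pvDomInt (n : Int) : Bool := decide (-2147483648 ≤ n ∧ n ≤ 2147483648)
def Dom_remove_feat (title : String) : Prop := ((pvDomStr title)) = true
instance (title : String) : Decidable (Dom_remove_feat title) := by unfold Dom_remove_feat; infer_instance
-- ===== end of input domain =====

-- B replaces A's split-at-parenthesis and part-by-part prefix-rebuilding loop by a single rfind and slice; same return value, proved equal.

-- ===== PORT A =====
-- title.split("(") is ported as Chars.splitOn on the code points (sep ≠ "", exact);
-- b[0] never raises (split always returns at least one part), so pyGetD with a dummy default is exact there.
def remove_feat (title : String) : String :=
  if PySem.Str.isIn "(Ft" title || PySem.Str.isIn "(ft" title ||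
     PySem.Str.isIn "(Feat" title || PySem.Str.isIn "(feat" title then
    let b := PySem.Chars.splitOn title.toList ['(']
    let t0 := PySem.List.pyGetD b 0 []
    let t := (PySem.List.pyRange 1 ((b.length : Int) - 1) 1).foldl
      (fun t i => t ++ ['('] ++ PySem.List.pyGetD b i []) t0
    String.ofList (PySem.Chars.strip t)
  else
    String.ofList (PySem.Chars.strip title.toList)

-- ===== PORT B =====
def remove_feat_alt (title : String) : String :=
  if PySem.Str.isIn "(Ft" title || PySem.Str.isIn "(ft" title ||
     PySem.Str.isIn "(Feat" title || PySem.Str.isIn "(feat" title then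
    let idx := PySem.Str.rfind title "("
    String.ofList (PySem.Chars.strip (PySem.Chars.slice title.toList none (some idx)))
  else
    String.ofList (PySem.Chars.strip title.toList)

-- ===== PRECONDITION & SPEC =====
def Spec_remove_feat (title : String) (out : String) : Prop := out = remove_feat_alt title
instance (title : String) (out : String) : Decidable (Spec_remove_feat title out) := by unfold Spec_remove_feat; infer_instance

-- ===== CLAIM (what is proved, stated in full; the proofs are below) =====
def Claim_equal_remove_feat : Prop := ∀ (title : String), Dom_remove_feat title → Spec_remove_feat title (remove_feat title)

-- ===== LEMMAS AND PROOFS =====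

-- intercalate over two or more parts
theorem interc2 (a b : List Char) (t : List (List Char)) :
    (['('] : List Char).intercalate (a :: b :: t) = a ++ ['('] ++ ['('].intercalate (b :: t) := by
  simp [List.intercalate, List.intersperse_cons₂]

-- PySem's split on "(" is Mathlib's List.splitOn '('
theorem splitOn_go_eq (fuel : Nat) (l cur : List Char) (acc : List (List Char))
    (h : l.length ≤ fuel) :
    PySem.Chars.splitOn.go ['('] fuel l cur acc
      = acc.reverse ++ (l.splitOn '(').modifyHead (cur.reverse ++ ·) := by
  induction fuel generalizing l cur acc with
  | zero =>
    cases l with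
    | nil => simp [PySem.Chars.splitOn.go, List.splitOn, List.modifyHead]
    | cons c rest => simp at h
  | succ fuel ih =>
    cases l with
    | nil => simp [PySem.Chars.splitOn.go, List.splitOn, List.modifyHead]
    | cons c rest =>
      simp only [PySem.Chars.splitOn.go]
      by_cases hc : c = '('
      · subst hc
        have hpre : List.isPrefixOf ['('] ('(' :: rest) = true := by
          simp [List.isPrefixOf]
        rw [if_pos hpre]
        rw [show List.drop (['('] : List Char).length ('(' :: rest) = rest from rfl]
        simp only [List.length_cons] at h
        rw [ih rest [] (cur.reverse :: acc) (by omega)]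
        simp only [List.splitOn, List.splitOnP_cons, List.modifyHead]
        simp only [beq_self_eq_true, if_pos, List.reverse_cons, List.reverse_nil,
          List.nil_append, List.append_assoc, List.singleton_append]
        cases List.splitOnP (fun x => x == '(') rest <;> simp
      · have hpre : List.isPrefixOf ['('] (c :: rest) = false := by
          simp [List.isPrefixOf]
          intro h'; exact absurd h'.symm hc
        rw [if_neg (by simp [hpre])]
        simp only [List.length_cons] at h
        rw [ih rest (c :: cur) acc (by omega)]
        simp only [List.splitOn, List.splitOnP_cons, show (c == '(') = false by simp [hc]]
        cases hs : List.splitOnP (· == '(') rest with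
        | nil => exact absurd hs (List.splitOnP_ne_nil _ rest)
        | cons a t => simp [List.modifyHead]

theorem splitOn_eq (cs : List Char) :
    PySem.Chars.splitOn cs ['('] = cs.splitOn '(' := by
  have h2 : ∀ (l : List (List Char)), List.modifyHead (fun x : List Char => x) l = l := by
    intro l; cases l <;> rfl
  have := splitOn_go_eq (cs.length + 1) cs [] [] (by omega)
  simpa [PySem.Chars.splitOn, h2] using this

theorem splitOn_ne_nil' (cs : List Char) : cs.splitOn '(' ≠ [] :=
  List.splitOnP_ne_nil _ cs

theorem last_no_paren (cs : List Char) (x : List Char)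
    (hx : (cs.splitOn '(').getLast? = some x) : '(' ∉ x := by
  induction cs generalizing x with
  | nil =>
    simp [List.splitOn] at hx
    subst hx; simp
  | cons c rest ih =>
    by_cases hc : c = '('
    · subst hc
      have hs : (('(' :: rest).splitOn '(') = [] :: rest.splitOn '(' := by
        simp [List.splitOn, List.splitOnP_cons]
      rw [hs] at hx
      obtain ⟨a0, t0, h0⟩ := List.exists_cons_of_ne_nil (splitOn_ne_nil' rest)
      rw [h0, List.getLast?_cons_cons] at hx
      exact ih x (by rw [h0]; exact hx)
    · have hs : ((c :: rest).splitOn '(') = (rest.splitOn '(').modifyHead (c :: ·) := by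
        simp [List.splitOn, List.splitOnP_cons, hc]
      rw [hs] at hx
      obtain ⟨a0, t0, h0⟩ := List.exists_cons_of_ne_nil (splitOn_ne_nil' rest)
      rw [h0] at hx
      cases t0 with
      | nil =>
        simp only [List.modifyHead, List.getLast?_singleton, Option.some_inj] at hx
        have := ih a0 (by rw [h0]; exact List.getLast?_singleton)
        subst hx
        intro hmem
        rcases List.mem_cons.mp hmem with h' | h'
        · exact hc h'.symm
        · exact this h'
      | cons b0 u0 =>
        simp only [List.modifyHead, List.getLast?_cons_cons] at hx
        exact ih x (by rw [h0, List.getLast?_cons_cons]; exact hx)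

theorem two_le_splitOn (cs : List Char) (h : '(' ∈ cs) : 2 ≤ (cs.splitOn '(').length := by
  induction cs with
  | nil => simp at h
  | cons c rest ih =>
    by_cases hc : c = '('
    · subst hc
      have hs : (('(' :: rest).splitOn '(') = [] :: rest.splitOn '(' := by
        simp [List.splitOn, List.splitOnP_cons]
      rw [hs]
      have h1 : 1 ≤ (rest.splitOn '(').length :=
        List.length_pos_iff.mpr (splitOn_ne_nil' rest)
      simp; omega
    · have hs : ((c :: rest).splitOn '(') = (rest.splitOn '(').modifyHead (c :: ·) := by
        simp [List.splitOn, List.splitOnP_cons, hc]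
      have hr : '(' ∈ rest := by
        rcases List.mem_cons.mp h with h' | h'
        · exact absurd h'.symm hc
        · exact h'
      rw [hs, List.length_modifyHead]
      exact ih hr

theorem intercalate_eq_dropLast_getLast (b : List (List Char)) (x : List Char)
    (h2 : 2 ≤ b.length) (hx : b.getLast? = some x) :
    (['('] : List Char).intercalate b
      = ['('].intercalate b.dropLast ++ '(' :: x := by
  induction b generalizing x with
  | nil => simp at h2
  | cons a t ih =>
    cases t with
    | nil => simp at h2
    | cons y u =>
      cases u with
      | nil =>
        rw [List.getLast?_cons_cons, List.getLast?_singleton, Option.some_inj] at hx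
        subst hx
        simp [List.intercalate]
      | cons z v =>
        rw [List.getLast?_cons_cons] at hx
        have := ih x (by simp) hx
        rw [interc2, this]
        simp [List.dropLast_cons_of_ne_nil, interc2]

theorem foldl_inter (l : List (List Char)) (x : List Char) :
    l.foldl (fun a p => a ++ ['('] ++ p) x = (['('] : List Char).intercalate (x :: l) := by
  induction l generalizing x with
  | nil => simp [List.intercalate]
  | cons p t ih =>
    rw [List.foldl_cons, ih]
    cases t with
    | nil => simp [List.intercalate]
    | cons q v => rw [interc2, interc2, interc2]; simp

theorem prefix_paren_iff (t : List Char) :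
    List.isPrefixOf ['('] t = true ↔ ∃ u, t = '(' :: u := by
  cases t with
  | nil => simp [List.isPrefixOf]
  | cons c u =>
    simp [List.isPrefixOf]
    exact eq_comm

-- rfind.go finds the occurrence P.length when nothing to its right matches
theorem rfind_go_eq (P L : List Char) (hL : '(' ∉ L) :
    ∀ j, P.length ≤ j →
      PySem.Chars.rfind.go (P ++ '(' :: L) ['('] j = P.length := by
  intro j
  induction j with
  | zero =>
    intro hj
    have hP : P = [] := List.eq_nil_of_length_eq_zero (by omega)
    subst hP
    simp [PySem.Chars.rfind.go, List.isPrefixOf]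
  | succ j ih =>
    intro hj
    by_cases he : P.length = j + 1
    · simp only [PySem.Chars.rfind.go]
      have hpre : List.isPrefixOf ['('] (List.drop (j + 1) (P ++ '(' :: L)) = true := by
        rw [← he, List.drop_left]
        simp [List.isPrefixOf]
      rw [if_pos hpre, he]
    · have hlt : P.length ≤ j := by omega
      simp only [PySem.Chars.rfind.go]
      have hd : List.drop (j + 1) (P ++ '(' :: L) = List.drop (j - P.length) L := by
        rw [List.drop_append, List.drop_eq_nil_of_le (by omega)]
        rw [List.nil_append,
          show j + 1 - P.length = (j - P.length) + 1 by omega, List.drop_succ_cons]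
      have hno : List.isPrefixOf ['('] (List.drop (j + 1) (P ++ '(' :: L)) = false := by
        rw [Bool.eq_false_iff]
        intro hpre
        rcases (prefix_paren_iff _).mp hpre with ⟨u, hu⟩
        rw [hd] at hu
        have hm : '(' ∈ List.drop (j - P.length) L := by rw [hu]; simp
        exact hL (List.mem_of_mem_drop hm)
      rw [if_neg (by simp [hno])]
      exact ih hlt

theorem rfind_eq_len (P L : List Char) (hL : '(' ∉ L) :
    PySem.Chars.rfind (P ++ '(' :: L) ['('] = P.length := by
  unfold PySem.Chars.rfind
  exact rfind_go_eq P L hL _ (by simp only [List.length_append, List.length_cons]; omega)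

-- guard true ⇒ '(' occurs in the title
theorem paren_mem_of_guard (title : String)
    (h : (PySem.Str.isIn "(Ft" title || PySem.Str.isIn "(ft" title ||
          PySem.Str.isIn "(Feat" title || PySem.Str.isIn "(feat" title) = true) :
    '(' ∈ title.toList := by
  rcases Bool.or_eq_true_iff.mp h with h' | h4
  · rcases Bool.or_eq_true_iff.mp h' with h'' | h3
    · rcases Bool.or_eq_true_iff.mp h'' with h1 | h2
      · exact (PySem.Str.isIn_iff_infix _ _ |>.mp h1).subset (by decide)
      · exact (PySem.Str.isIn_iff_infix _ _ |>.mp h2).subset (by decide)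
    · exact (PySem.Str.isIn_iff_infix _ _ |>.mp h3).subset (by decide)
  · exact (PySem.Str.isIn_iff_infix _ _ |>.mp h4).subset (by decide)

-- A's split-and-rebuild value is the intercalation of all but the last part
theorem loopA_eq (b : List (List Char)) (h2 : 2 ≤ b.length) :
    (PySem.List.pyRange 1 ((b.length : Int) - 1) 1).foldl
      (fun t i => t ++ ['('] ++ PySem.List.pyGetD b i []) (PySem.List.pyGetD b 0 [])
      = (['('] : List Char).intercalate b.dropLast := by
  obtain ⟨a, t, rfl⟩ : ∃ a t, b = a :: t := by
    cases b with
    | nil => simp at h2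
    | cons a t => exact ⟨a, t, rfl⟩
  have ht : t ≠ [] := by intro h; subst h; simp at h2
  have hlen : (((a :: t).length : Int) - 1) = PySem.List.len ((a :: t).dropLast) := by
    simp [PySem.List.len, List.length_dropLast]
  have hgetD : ∀ (acc : List Char), ∀ i ∈ PySem.List.pyRange 1 (PySem.List.len ((a :: t).dropLast)) 1,
      acc ++ ['('] ++ PySem.List.pyGetD (a :: t) i []
        = acc ++ ['('] ++ PySem.List.pyGetD ((a :: t).dropLast) i [] := by
    intro acc i hi
    have hmem := PySem.List.mem_pyRange_one.mp hi
    simp only [PySem.List.len, List.length_dropLast, List.length_cons] at hmem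
    have h0 : 0 ≤ i := by omega
    have hlt : i.toNat < ((a :: t).dropLast).length := by
      simp only [List.length_dropLast, List.length_cons]
      omega
    rw [show i = (i.toNat : Int) by omega,
      PySem.List.pyGetD_natCast, PySem.List.pyGetD_natCast,
      List.getD_eq_getElem _ _ hlt,
      List.getD_eq_getElem _ _ (by simp only [List.length_dropLast, List.length_cons] at hlt ⊢; omega),
      List.getElem_dropLast]
  calc (PySem.List.pyRange 1 (((a :: t).length : Int) - 1) 1).foldl
        (fun acc i => acc ++ ['('] ++ PySem.List.pyGetD (a :: t) i []) (PySem.List.pyGetD (a :: t) 0 [])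
      = (PySem.List.pyRange 1 (PySem.List.len ((a :: t).dropLast)) 1).foldl
        (fun acc i => acc ++ ['('] ++ PySem.List.pyGetD ((a :: t).dropLast) i [])
        (PySem.List.pyGetD (a :: t) 0 []) := by
        rw [hlen]
        exact PySem.List.foldl_congr_mem _ _ _ _ hgetD
    _ = (((a :: t).dropLast).drop (1 : Int).toNat).foldl (fun acc p => acc ++ ['('] ++ p)
        (PySem.List.pyGetD (a :: t) 0 []) :=
        PySem.List.foldl_pyRange_pyGetD _ [] _ _ (by omega)
    _ = (['('] : List Char).intercalate ((a :: t).dropLast) := by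
        rw [List.dropLast_cons_of_ne_nil ht]
        rw [show ((1 : Int)).toNat = 1 from rfl]
        simp only [List.drop_succ_cons, List.drop_zero]
        rw [show PySem.List.pyGetD (a :: t) 0 [] = a by
          rw [show (0 : Int) = ((0 : Nat) : Int) from rfl, PySem.List.pyGetD_natCast]; rfl]
        rw [foldl_inter]

-- ===== VERDICT (by name: the statement is the Claim_ definition above) =====
theorem remove_feat_spec : Claim_equal_remove_feat := by
  intro title _
  unfold Spec_remove_feat remove_feat remove_feat_alt
  by_cases hg : (PySem.Str.isIn "(Ft" title || PySem.Str.isIn "(ft" title ||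
      PySem.Str.isIn "(Feat" title || PySem.Str.isIn "(feat" title) = true
  · rw [if_pos hg, if_pos hg]
    have hmem := paren_mem_of_guard title hg
    have hsplit := splitOn_eq title.toList
    have h2 := two_le_splitOn title.toList hmem
    set b := title.toList.splitOn '(' with hb
    have hbne : b ≠ [] := splitOn_ne_nil' title.toList
    set P := (['('] : List Char).intercalate b.dropLast with hP
    obtain ⟨L, hL?⟩ : ∃ L, b.getLast? = some L :=
      ⟨b.getLast hbne, List.getLast?_eq_some_getLast hbne⟩
    have hdecomp : title.toList = P ++ '(' :: L := by
      rw [hP, ← intercalate_eq_dropLast_getLast b L h2 hL?, hb, List.intercalate_splitOn]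
    have hLast : '(' ∉ L := last_no_paren title.toList L (by rw [← hb]; exact hL?)
    have hrfind : PySem.Str.rfind title "(" = (P.length : Int) := by
      rw [PySem.Str.rfind_eq]
      show PySem.Chars.rfind title.toList "(".toList = _
      rw [show "(".toList = ['('] from rfl, hdecomp]
      exact rfind_eq_len P _ hLast
    have hslice : PySem.Chars.slice title.toList none (some (PySem.Str.rfind title "(")) = P := by
      rw [hrfind, PySem.Chars.slice_eq_listSlice,
        PySem.List.slice_to _ (Int.natCast_nonneg _)]
      rw [hdecomp, Int.toNat_natCast, List.take_left]
    have hA : (PySem.List.pyRange 1 (((PySem.Chars.splitOn title.toList ['(']).length : Int) - 1) 1).foldl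
        (fun t i => t ++ ['('] ++ PySem.List.pyGetD (PySem.Chars.splitOn title.toList ['(']) i [])
        (PySem.List.pyGetD (PySem.Chars.splitOn title.toList ['(']) 0 []) = P := by
      rw [hsplit]
      exact loopA_eq b h2
    simp only [hA, hslice]
  · rw [if_neg hg, if_neg hg]
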